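-- pv_equiv track=rewrite | github.com/Romanus190/OrbitalsAtom | klech.py | generate_electron_configuration
-- ===== SOURCE A (Python) =====
-- import string
--
-- def generate_electron_configuration(max_lvl_q):
--     def get_sublevel_letter(level_now):
--         standard_letters = ['s', 'p', 'd', 'f', 'g', 'h', 'i', 'k']
--         if level_now < len(standard_letters):
--             return standard_letters[level_now]
--         else:
--             letters = []
--             level_now -= 8  # Корректировка после 'k'
--             while level_now >= 0:
--                 letters.append(string.ascii_lowercase[level_now % 26])
--                 level_now = (level_now // 26) - 1
--             return ''.join(reversed(letters))
--
--     def sublevel_max_e(lvl):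
--         return 2 * (2 * lvl + 1)
--
--     configurations = []
--     n = 1
--     total_electrons = 0
--
--     while True:
--         for l in range(0, n):
--             configurations.append((n, l))
--         n += 1
--         if n > max_lvl_q:
--             break
--
--     configurations.sort(key=lambda x: (x[0] + x[1], x[0]))
--
--     result = []
--     for n, l in configurations:
--         sublevel_letter = get_sublevel_letter(l)
--         max_e = sublevel_max_e(l)
--         total_electrons += max_e
--         result.append(f"{n}{sublevel_letter}{max_e} {total_electrons}")
--
--     return result
-- ===== SOURCE B (Python) =====
-- import string
--
-- def generate_electron_configuration(max_lvl_q):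
--     def sublevel_letter(l):
--         if l < 8:
--             return 'spdfghik'[l]
--         def bij(k):
--             q, r = divmod(k, 26)
--             return ('' if q == 0 else bij(q - 1)) + string.ascii_lowercase[r]
--         return bij(l - 8)
--
--     N = max_lvl_q if max_lvl_q > 1 else 1
--     result = []
--     total = 0
--     for s in range(1, 2 * N):
--         for n in range((s + 2) // 2, min(s, N) + 1):
--             l = s - n
--             max_e = 4 * l + 2
--             total += max_e
--             result.append(f"{n}{sublevel_letter(l)}{max_e} {total}")
--     return result
-- ===== Notes on version B (the rewrite author's own statement) =====
-- stated objective: faster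
-- what changed: B emits the (n, l) pairs directly in Madelung order by iterating diagonals s = n+l ascending and n ascending within each diagonal, instead of generating all pairs row by row and sorting them by (n+l, n); the sort disappears.
import Mathlib
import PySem

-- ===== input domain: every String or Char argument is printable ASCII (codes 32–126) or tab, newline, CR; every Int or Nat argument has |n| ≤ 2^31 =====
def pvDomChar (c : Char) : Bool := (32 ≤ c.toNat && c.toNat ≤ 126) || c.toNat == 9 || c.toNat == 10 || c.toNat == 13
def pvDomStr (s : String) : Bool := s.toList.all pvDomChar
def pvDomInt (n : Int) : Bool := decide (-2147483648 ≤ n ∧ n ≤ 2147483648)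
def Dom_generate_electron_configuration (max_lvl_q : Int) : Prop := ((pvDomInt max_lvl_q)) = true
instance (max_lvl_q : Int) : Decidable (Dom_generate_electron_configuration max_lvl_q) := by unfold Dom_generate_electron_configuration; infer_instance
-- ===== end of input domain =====

-- B replaces A's "generate all (n,l), then sort by (n+l, n)" with a direct emission of the
-- pairs in Madelung order (diagonals n+l ascending, n ascending inside a diagonal): no sort.

-- ===== PORT A =====
def pvAStdLetters : List String := ["s", "p", "d", "f", "g", "h", "i", "k"]

def pvALowercase : List Char := "abcdefghijklmnopqrstuvwxyz".toList

-- the while-loop of get_sublevel_letter; appends low digit first, caller reverses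
def pvALetterLoop (level_now : Int) (letters : List Char) : List Char :=
  if _h : 0 ≤ level_now then
    pvALetterLoop (PySem.Int.floordiv level_now 26 - 1)
      (letters ++ [(PySem.List.pyGet? pvALowercase (PySem.Int.mod level_now 26)).getD 'a'])
  else letters
termination_by (level_now + 1).toNat
decreasing_by
  have := PySem.Int.floordiv_eq_ediv_of_pos (a := level_now) (b := 26) (by norm_num)
  omega

-- the index into pvAStdLetters is in range (0 ≤ level_now) at every call site, so getD "" is exact
def pvAGetSublevelLetter (level_now : Int) : String :=
  if level_now < 8 then (PySem.List.pyGet? pvAStdLetters level_now).getD ""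
  else String.ofList ((pvALetterLoop (level_now - 8) []).reverse)

def pvASublevelMaxE (lvl : Int) : Int := 2 * (2 * lvl + 1)

-- the while True / for l / n += 1 / break loop of A
def pvAConfigLoop (max_lvl_q n : Int) (configurations : List (Int × Int)) : List (Int × Int) :=
  let configurations :=
    (PySem.List.pyRange 0 n).foldl (fun acc l => acc ++ [(n, l)]) configurations
  if n + 1 > max_lvl_q then configurations else pvAConfigLoop max_lvl_q (n + 1) configurations
termination_by (max_lvl_q - n).toNat
decreasing_by omega

def generate_electron_configuration (max_lvl_q : Int) : List String :=
  let configurations := pvAConfigLoop max_lvl_q 1 []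
  let sortedC := PySem.List.sorted2 configurations (fun x => x.1 + x.2) (fun x => x.1)
  (sortedC.foldl
    (fun (st : List String × Int) x =>
      let max_e := pvASublevelMaxE x.2
      (st.1 ++ [PySem.Int.toStr x.1 ++ pvAGetSublevelLetter x.2 ++ PySem.Int.toStr max_e
                ++ " " ++ PySem.Int.toStr (st.2 + max_e)], st.2 + max_e))
    ([], 0)).1

-- ===== PORT B =====
-- bij(k): bijective base-26 word, high digit first; only called with 0 ≤ k
def pvBBij (k : Int) : List Char :=
  if _h : 0 ≤ k then
    (if hq : PySem.Int.floordiv k 26 = 0 then [] else pvBBij (PySem.Int.floordiv k 26 - 1))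
      ++ [(PySem.List.pyGet? "abcdefghijklmnopqrstuvwxyz".toList (PySem.Int.mod k 26)).getD 'a']
  else []
termination_by (k + 1).toNat
decreasing_by
  have := PySem.Int.floordiv_eq_ediv_of_pos (a := k) (b := 26) (by norm_num)
  omega

-- the index into "spdfghik" is in range (0 ≤ l < 8) at every call site, so getD 'a' is exact
def pvBSublevelLetter (l : Int) : String :=
  if l < 8 then String.ofList [(PySem.List.pyGet? "spdfghik".toList l).getD 'a']
  else String.ofList (pvBBij (l - 8))

def generate_electron_configuration_alt (max_lvl_q : Int) : List String :=
  let N := if max_lvl_q > 1 then max_lvl_q else 1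
  ((PySem.List.pyRange 1 (2 * N)).foldl
    (fun (st : List String × Int) s =>
      (PySem.List.pyRange (PySem.Int.floordiv (s + 2) 2) (min s N + 1)).foldl
        (fun (st : List String × Int) n =>
          let l := s - n
          let max_e := 4 * l + 2
          (st.1 ++ [PySem.Int.toStr n ++ pvBSublevelLetter l ++ PySem.Int.toStr max_e
                    ++ " " ++ PySem.Int.toStr (st.2 + max_e)], st.2 + max_e))
        st)
    ([], 0)).1

-- ===== PRECONDITION & SPEC =====
def Spec_generate_electron_configuration (max_lvl_q : Int) (out : List String) : Prop := out = generate_electron_configuration_alt max_lvl_q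
instance (max_lvl_q : Int) (out : List String) : Decidable (Spec_generate_electron_configuration max_lvl_q out) := by unfold Spec_generate_electron_configuration; infer_instance

-- ===== CLAIM (what is proved, stated in full; the proofs are below) =====
def Claim_equal_generate_electron_configuration : Prop := ∀ (max_lvl_q : Int), Dom_generate_electron_configuration max_lvl_q → Spec_generate_electron_configuration max_lvl_q (generate_electron_configuration max_lvl_q)

-- ===== LEMMAS AND PROOFS =====


-- proof-side: the sort key of A as one lexicographic value
def pvKey (p : Int × Int) : Int ×ₗ Int := toLex (p.1 + p.2, p.1)

-- proof-side: the list of (n, l) pairs B walks, diagonal by diagonal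
def pvDiag (N : Int) : List (Int × Int) :=
  (PySem.List.pyRange 1 (2 * N)).flatMap
    (fun s => (PySem.List.pyRange (PySem.Int.floordiv (s + 2) 2) (min s N + 1)).map
      (fun n => (n, s - n)))

lemma pvRange_pairwise (a b : Int) : (PySem.List.pyRange a b).Pairwise (· < ·) := by
  rw [PySem.List.pyRange_of_pos a b (by norm_num : (0:Int) < 1)]
  exact List.Pairwise.map _ (fun x y h => by omega) List.pairwise_lt_range

lemma pvLetterLoop_eq : ∀ (m : Nat) (k : Int), 0 ≤ k → k.toNat ≤ m → ∀ acc,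
    pvALetterLoop k acc = acc ++ (pvBBij k).reverse := by
  intro m
  induction m with
  | zero =>
    intro k hk hm acc
    have hk0 : k = 0 := by omega
    subst hk0
    rw [pvALetterLoop, dif_pos (by norm_num), pvALetterLoop, dif_neg (by norm_num), pvBBij]
    rw [dif_pos (by norm_num), dif_pos (by decide)]
    simp [pvALowercase]
  | succ f ih =>
    intro k hk hm acc
    rw [pvALetterLoop, dif_pos hk, pvBBij, dif_pos hk]
    have h26 : PySem.Int.floordiv k 26 = k / 26 :=
      PySem.Int.floordiv_eq_ediv_of_pos (by norm_num)
    by_cases hq : PySem.Int.floordiv k 26 = 0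
    · rw [pvALetterLoop, dif_neg (by omega), dif_pos hq]
      simp [pvALowercase]
    · rw [ih (PySem.Int.floordiv k 26 - 1) (by omega) (by omega), dif_neg hq]
      simp [pvALowercase]

lemma pvLetter_eq (l : Int) (hl : 0 ≤ l) : pvAGetSublevelLetter l = pvBSublevelLetter l := by
  unfold pvAGetSublevelLetter pvBSublevelLetter
  by_cases h8 : l < 8
  · rw [if_pos h8, if_pos h8]
    interval_cases l <;> rfl
  · rw [if_neg h8, if_neg h8]
    rw [pvLetterLoop_eq (l - 8).toNat (l - 8) (by omega) (by omega) []]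
    simp

lemma pvConfigLoop_unfold (m n : Int) (acc : List (Int × Int)) : pvAConfigLoop m n acc =
    (if n + 1 > m then acc ++ (PySem.List.pyRange 0 n).map (fun l => (n, l))
     else pvAConfigLoop m (n + 1) (acc ++ (PySem.List.pyRange 0 n).map (fun l => (n, l)))) := by
  rw [pvAConfigLoop]
  rw [PySem.List.foldl_append_singleton_eq_map]

lemma pvConfigLoop_acc (m : Int) : ∀ (fuel : Nat) (n : Int), (m - n).toNat ≤ fuel →
    ∀ acc, pvAConfigLoop m n acc = acc ++ pvAConfigLoop m n [] := by
  intro fuel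
  induction fuel with
  | zero =>
    intro n hn acc
    rw [pvConfigLoop_unfold m n acc, pvConfigLoop_unfold m n []]
    have h : n + 1 > m := by omega
    simp only [if_pos h]
    simp
  | succ f ih =>
    intro n hn acc
    rw [pvConfigLoop_unfold m n acc, pvConfigLoop_unfold m n []]
    by_cases h : n + 1 > m
    · simp only [if_pos h]
      simp
    · simp only [if_neg h]
      rw [ih (n + 1) (by omega), ih (n + 1) (by omega) ([] ++ _)]
      simp

lemma pvConfigLoop_mem (m : Int) : ∀ (fuel : Nat) (n : Int), (m - n).toNat ≤ fuel →
    ∀ p : Int × Int, (p ∈ pvAConfigLoop m n [] ↔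
      n ≤ p.1 ∧ p.1 ≤ max m n ∧ 0 ≤ p.2 ∧ p.2 < p.1) := by
  intro fuel
  induction fuel with
  | zero =>
    intro n hn p
    obtain ⟨p1, p2⟩ := p
    rw [pvConfigLoop_unfold, if_pos (by omega)]
    simp only [List.nil_append, List.mem_map, PySem.List.mem_pyRange_one]
    constructor
    · rintro ⟨l, ⟨h0, h1⟩, heq⟩
      injection heq with e1 e2
      omega
    · rintro ⟨h1, h2, h3, h4⟩
      exact ⟨p2, ⟨by omega, by omega⟩, by rw [show p1 = n from by omega]⟩
  | succ f ih =>
    intro n hn p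
    obtain ⟨p1, p2⟩ := p
    rw [pvConfigLoop_unfold]
    by_cases h : n + 1 > m
    · rw [if_pos h]
      simp only [List.nil_append, List.mem_map, PySem.List.mem_pyRange_one]
      constructor
      · rintro ⟨l, ⟨h0, h1⟩, heq⟩
        injection heq with e1 e2
        omega
      · rintro ⟨h1, h2, h3, h4⟩
        exact ⟨p2, ⟨by omega, by omega⟩, by rw [show p1 = n from by omega]⟩
    · rw [if_neg h, pvConfigLoop_acc m f (n + 1) (by omega)]
      rw [List.mem_append, ih (n + 1) (by omega)]
      simp only [List.nil_append, List.mem_map, PySem.List.mem_pyRange_one]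
      constructor
      · rintro (⟨l, ⟨h0, h1⟩, heq⟩ | hr)
        · injection heq with e1 e2
          omega
        · omega
      · rintro ⟨h1, h2, h3, h4⟩
        by_cases hp : p1 = n
        · exact Or.inl ⟨p2, ⟨by omega, by omega⟩, by rw [hp]⟩
        · exact Or.inr (by constructor <;> [omega; skip]; constructor <;> [omega; omega])

lemma pvRowNodup (n : Int) : (List.map (fun l => (n, l)) (PySem.List.pyRange 0 n)).Nodup := by
  refine List.Pairwise.map _ (fun a b hab => ?_) (pvRange_pairwise 0 n)
  intro he
  injection he with h1 h2
  omega

lemma pvConfigLoop_nodup (m : Int) : ∀ (fuel : Nat) (n : Int), (m - n).toNat ≤ fuel →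
    (pvAConfigLoop m n []).Nodup := by
  intro fuel
  induction fuel with
  | zero =>
    intro n hn
    rw [pvConfigLoop_unfold, if_pos (by omega)]
    simpa using pvRowNodup n
  | succ f ih =>
    intro n hn
    rw [pvConfigLoop_unfold]
    by_cases h : n + 1 > m
    · rw [if_pos h]
      simpa using pvRowNodup n
    · rw [if_neg h, pvConfigLoop_acc m f (n + 1) (by omega)]
      simp only [List.nil_append]
      rw [List.nodup_append]
      refine ⟨pvRowNodup n, ih (n + 1) (by omega), ?_⟩
      intro p hp q hq
      rw [pvConfigLoop_mem m f (n + 1) (by omega)] at hq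
      simp only [List.mem_map, PySem.List.mem_pyRange_one] at hp
      obtain ⟨l, hl, rfl⟩ := hp
      intro he
      rw [← he] at hq
      omega

lemma pvDiag_mem (N : Int) (p : Int × Int) : p ∈ pvDiag N ↔
    1 ≤ p.1 ∧ p.1 ≤ N ∧ 0 ≤ p.2 ∧ p.2 < p.1 := by
  obtain ⟨p1, p2⟩ := p
  simp only [pvDiag, List.mem_flatMap, List.mem_map, PySem.List.mem_pyRange_one]
  constructor
  · rintro ⟨s, ⟨hs1, hs2⟩, n, ⟨hn1, hn2⟩, heq⟩
    cases heq
    rw [PySem.Int.floordiv_eq_ediv_of_pos (by norm_num : (0:Int) < 2)] at hn1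
    omega
  · rintro ⟨h1, h2, h3, h4⟩
    refine ⟨p1 + p2, ⟨by omega, by omega⟩, p1, ⟨?_, ?_⟩, by show (p1, p1 + p2 - p1) = (p1, p2); rw [show p1 + p2 - p1 = p2 from by ring]⟩
    · rw [PySem.Int.floordiv_eq_ediv_of_pos (by norm_num : (0:Int) < 2)]
      omega
    · show p1 < min (p1 + p2) N + 1
      omega

lemma pvDiag_pairwise (N : Int) : (pvDiag N).Pairwise (fun p q => pvKey p < pvKey q) := by
  rw [pvDiag, List.pairwise_flatMap]
  constructor
  · intro s hs
    refine List.Pairwise.map _ (fun a b h => ?_) (pvRange_pairwise _ _)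
    simp only [pvKey]
    rw [Prod.Lex.toLex_lt_toLex]
    right
    constructor <;> simp <;> omega
  · refine (pvRange_pairwise _ _).imp (fun {s1 s2} h12 => ?_)
    intro x hx y hy
    simp only [List.mem_map] at hx hy
    obtain ⟨n1, _, rfl⟩ := hx
    obtain ⟨n2, _, rfl⟩ := hy
    simp only [pvKey]
    rw [Prod.Lex.toLex_lt_toLex]
    left
    simp
    omega

lemma pvSorted2_eq (xs : List (Int × Int)) :
    PySem.List.sorted2 xs (fun x => x.1 + x.2) (fun x => x.1) = PySem.List.sorted xs pvKey := by
  rw [PySem.List.sorted_eq_foldl_insertBy]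
  have hb : ∀ a b : Int × Int,
      (decide (a.1 + a.2 < b.1 + b.2) || (!decide (b.1 + b.2 < a.1 + a.2) && decide (a.1 < b.1)))
        = decide (pvKey a < pvKey b) := by
    intro a b
    have hiff : (pvKey a < pvKey b) ↔ (a.1 + a.2 < b.1 + b.2 ∨ (a.1 + a.2 = b.1 + b.2 ∧ a.1 < b.1)) := by
      simp only [pvKey]
      exact Prod.Lex.toLex_lt_toLex
    by_cases h1 : a.1 + a.2 < b.1 + b.2 <;> by_cases h2 : b.1 + b.2 < a.1 + a.2 <;>
      by_cases h3 : a.1 < b.1 <;> simp [h1, h2, h3, hiff] <;> omega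
  simp only [PySem.List.sorted2]
  simp only [hb]
  simp

lemma pvSortedConfigs (m : Int) :
    PySem.List.sorted2 (pvAConfigLoop m 1 []) (fun x => x.1 + x.2) (fun x => x.1)
      = pvDiag (if m > 1 then m else 1) := by
  rw [pvSorted2_eq]
  apply PySem.List.sorted_eq_of_perm_of_pairwise_lt
  · have hd := pvConfigLoop_nodup m (m - 1).toNat 1 (by omega)
    rw [List.perm_ext_iff_of_nodup (by
      exact (pvDiag_pairwise _).imp (fun h => by intro he; subst he; exact lt_irrefl _ h)) hd]
    intro p
    rw [pvDiag_mem, pvConfigLoop_mem m (m - 1).toNat 1 (by omega)]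
    have hN : (if m > 1 then m else 1) = max m 1 := by split <;> omega
    rw [hN]
  · exact pvDiag_pairwise _

-- ===== VERDICT (by name: the statement is the Claim_ definition above) =====
theorem generate_electron_configuration_spec : Claim_equal_generate_electron_configuration := by
  intro m _
  unfold Spec_generate_electron_configuration
  simp only [generate_electron_configuration, generate_electron_configuration_alt]
  rw [pvSortedConfigs m]
  simp only [pvDiag, List.foldl_flatMap, List.foldl_map]
  congr 1
  apply PySem.List.foldl_congr_mem
  intro acc s hs
  apply PySem.List.foldl_congr_mem
  intro st n hn
  rw [PySem.List.mem_pyRange_one] at hn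
  have hl : 0 ≤ s - n := by omega
  simp only [pvASublevelMaxE]
  rw [pvLetter_eq (s - n) hl]
  rw [show 2 * (2 * (s - n) + 1) = 4 * (s - n) + 2 from by ring]
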